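-- pv_equiv track=rewrite | github.com/RCBSi/advent-of-code-2019 | day_16_pt1.py | fftmat
-- ===== SOURCE A (Python) =====
-- def fftmat(nu):
--     pa = [0, 1, 0, -1]
--     ma = []
--     for i in range(1,nu+1):
--         st = []
--         for e in pa:
--             st = st+[e]*i
--         ma.append((st*nu)[1:nu+1])
--     return ma
-- ===== SOURCE B (Python) =====
-- def fftmat(nu):
--     def val(m):
--         return 1 if m == 1 else (-1 if m == 3 else 0)
--     return [[val(((j + 1) // i) % 4) for j in range(nu)] for i in range(1, nu + 1)]
-- ===== Notes on version B (the rewrite author's own statement) =====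
-- stated objective: faster
-- what changed: Each matrix entry is computed directly from the closed form pattern[((j+1)//i)%4] instead of materialising the repeated-and-tiled pattern list and slicing it per row.
import Mathlib
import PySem

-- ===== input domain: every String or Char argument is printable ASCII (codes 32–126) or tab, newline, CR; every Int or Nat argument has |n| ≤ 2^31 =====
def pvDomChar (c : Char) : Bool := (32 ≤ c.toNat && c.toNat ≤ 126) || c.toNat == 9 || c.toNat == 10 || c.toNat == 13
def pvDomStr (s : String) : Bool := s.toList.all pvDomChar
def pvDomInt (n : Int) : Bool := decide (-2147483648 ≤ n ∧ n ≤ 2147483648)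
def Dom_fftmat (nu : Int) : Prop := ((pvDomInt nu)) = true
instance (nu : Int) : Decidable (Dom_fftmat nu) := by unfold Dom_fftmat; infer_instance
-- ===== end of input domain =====

-- B computes each FFT-pattern entry directly by the closed form pattern[((j+1)//i)%4],
-- instead of A's building the i-times-repeated pattern, tiling it nu times and slicing (faster: O(n^2) vs O(n^3)).

-- ===== PORT A =====
def fftmat (nu : Int) : List (List Int) :=
  let pa : List Int := [0, 1, 0, -1]
  (PySem.List.pyRange 1 (nu + 1) 1).foldl
    (fun ma i =>
      let st := pa.foldl (fun st e => st ++ List.replicate i.toNat e) []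
      ma ++ [PySem.List.slice ((List.replicate nu.toNat st).flatten) (some 1) (some (nu + 1))])
    []

-- ===== PORT B =====
-- Source B's helper 'val'
def pvVal (m : Int) : Int := if m = 1 then 1 else if m = 3 then -1 else 0

def fftmat_alt (nu : Int) : List (List Int) :=
  (PySem.List.pyRange 1 (nu + 1) 1).map (fun i =>
    (PySem.List.pyRange 0 nu 1).map (fun j =>
      pvVal (PySem.Int.mod (PySem.Int.floordiv (j + 1) i) 4)))

-- ===== PRECONDITION & SPEC =====
def Spec_fftmat (nu : Int) (out : List (List Int)) : Prop := out = fftmat_alt nu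
instance (nu : Int) (out : List (List Int)) : Decidable (Spec_fftmat nu out) := by unfold Spec_fftmat; infer_instance

-- ===== CLAIM (what is proved, stated in full; the proofs are below) =====
def Claim_equal_fftmat : Prop := ∀ (nu : Int), Dom_fftmat nu → Spec_fftmat nu (fftmat nu)

-- ===== LEMMAS AND PROOFS =====

-- append indexing, split into the two cases
theorem pv_getElem?_append_lt {α : Type} (l₁ l₂ : List α) (m : Nat) (h : m < l₁.length) :
    (l₁ ++ l₂)[m]? = l₁[m]? := by
  rw [List.getElem?_append, if_pos h]

theorem pv_getElem?_append_ge {α : Type} (l₁ l₂ : List α) (m : Nat) (h : l₁.length ≤ m) :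
    (l₁ ++ l₂)[m]? = l₂[m - l₁.length]? := by
  rw [List.getElem?_append, if_neg (by omega)]

-- a left fold that appends f x each step is init ++ flatMap f
theorem pv_foldl_append_flatMap {α β : Type} (f : α → List β) (l : List α) (init : List β) :
    l.foldl (fun acc x => acc ++ f x) init = init ++ l.flatMap f := by
  induction l generalizing init with
  | nil => simp
  | cons x xs ih => simp [ih, List.append_assoc]

-- a left fold that appends [g x] each step is init ++ map g
theorem pv_foldl_append_map {α β : Type} (g : α → β) (l : List α) (init : List β) :
    l.foldl (fun acc x => acc ++ [g x]) init = init ++ l.map g := by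
  induction l generalizing init with
  | nil => simp
  | cons x xs ih => simp [ih, List.append_assoc]

-- indexing into a tiled list wraps modulo the tile length
theorem pv_flatten_replicate_getElem? {α : Type} (n : Nat) (l : List α) (m : Nat)
    (h : m < n * l.length) :
    ((List.replicate n l).flatten)[m]? = l[m % l.length]? := by
  induction n generalizing m with
  | zero => omega
  | succ n ih =>
    simp only [List.replicate_succ, List.flatten_cons]
    by_cases hm : m < l.length
    · rw [pv_getElem?_append_lt _ _ _ hm, Nat.mod_eq_of_lt hm]
    · have hm' : l.length ≤ m := by omega
      rw [Nat.succ_mul] at h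
      rw [pv_getElem?_append_ge _ _ _ hm', ih (m - l.length) (by omega),
        ← Nat.mod_eq_sub_mod hm']

-- one tile: element r of the i-times-stretched base pattern is pa[r / k]
theorem pv_st_getElem? (k r : Nat) (_hk : 1 ≤ k) (h : r < 4 * k) :
    (List.replicate k (0 : Int) ++ List.replicate k 1 ++ List.replicate k 0 ++
      List.replicate k (-1))[r]? = some (pvVal (((r / k : Nat) : Int))) := by
  rcases Nat.lt_or_ge r k with h1 | h1
  · rw [pv_getElem?_append_lt _ _ _ (by simp; omega),
      pv_getElem?_append_lt _ _ _ (by simp; omega),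
      pv_getElem?_append_lt _ _ _ (by simpa using h1)]
    simp [h1, Nat.div_eq_of_lt h1, pvVal]
  rcases Nat.lt_or_ge r (2 * k) with h2 | h2
  · rw [pv_getElem?_append_lt _ _ _ (by simp; omega),
      pv_getElem?_append_lt _ _ _ (by simp; omega),
      pv_getElem?_append_ge _ _ _ (by simpa using h1)]
    have hd : r / k = 1 := by rw [Nat.div_eq_of_lt_le] <;> omega
    simp [hd, pvVal, show r - k < k from by omega]
  rcases Nat.lt_or_ge r (3 * k) with h3 | h3
  · rw [pv_getElem?_append_lt _ _ _ (by simp; omega),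
      pv_getElem?_append_ge _ _ _ (by simp; omega)]
    have hd : r / k = 2 := by rw [Nat.div_eq_of_lt_le] <;> omega
    simp [hd, pvVal, show r - (k + k) < k from by omega]
  · rw [pv_getElem?_append_ge _ _ _ (by simp; omega)]
    have hd : r / k = 3 := by rw [Nat.div_eq_of_lt_le] <;> omega
    simp [hd, pvVal, show r - (k + (k + k)) < k from by omega]

-- the rows agree: A's build-stretch-tile-slice row equals B's closed-form row
theorem pv_row_eq (n k : Nat) (hk : 1 ≤ k) (hkn : k ≤ n) :
    PySem.List.slice
        ((List.replicate n (List.replicate k (0 : Int) ++ List.replicate k 1 ++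
          List.replicate k 0 ++ List.replicate k (-1))).flatten)
        (some 1) (some ((n : Int) + 1))
      = (List.range n).map (fun j => pvVal (((j + 1) / k % 4 : Nat) : Int)) := by
  have hn : 1 ≤ n := le_trans hk hkn
  rw [PySem.List.slice_toNat _ (show (0:Int) ≤ 1 by norm_num) (show (0:Int) ≤ (n:Int) + 1 by positivity)]
  rw [show ((n : Int) + 1).toNat = n + 1 by omega, show ((1 : Int)).toNat = 1 by rfl]
  simp only [Nat.add_sub_cancel]
  apply List.ext_getElem?
  intro m
  by_cases hm : m < n
  · have hlen : 1 + m < n * (4 * k) := by nlinarith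
    rw [List.getElem?_take_of_lt hm, List.getElem?_drop,
      pv_flatten_replicate_getElem? n _ (1 + m)
        (by simp only [List.length_append, List.length_replicate]; rw [show k + k + k + k = 4 * k by ring]; omega)]
    simp only [List.length_append, List.length_replicate]
    rw [show k + k + k + k = k * 4 by ring]
    rw [pv_st_getElem? k ((1 + m) % (k * 4)) hk
      (by have := Nat.mod_lt (1 + m) (y := k * 4) (by omega); omega)]
    rw [Nat.mod_mul_right_div_self]
    rw [List.getElem?_map, List.getElem?_range hm]
    simp [Nat.add_comm 1 m]
  · rw [List.getElem?_eq_none (le_trans (List.length_take_le _ _) (by omega))]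
    rw [List.getElem?_eq_none (by simp; omega)]

-- ===== VERDICT (by name: the statement is the Claim_ definition above) =====
theorem fftmat_spec : Claim_equal_fftmat := by
  intro nu _
  unfold Spec_fftmat fftmat fftmat_alt
  rw [pv_foldl_append_map, List.nil_append]
  apply List.map_congr_left
  intro i hi
  rw [PySem.List.mem_pyRange_one] at hi
  obtain ⟨h1, h2⟩ := hi
  obtain ⟨k, rfl⟩ : ∃ k : Nat, i = (k : Int) := ⟨i.toNat, (Int.toNat_of_nonneg (by omega)).symm⟩
  obtain ⟨n, rfl⟩ : ∃ n : Nat, nu = (n : Int) := ⟨nu.toNat, (Int.toNat_of_nonneg (by omega)).symm⟩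
  have hk : 1 ≤ k := by exact_mod_cast h1
  have hkn : k ≤ n := by omega
  have hfold : ([0, 1, 0, -1] : List Int).foldl
      (fun st e => st ++ List.replicate (k : Int).toNat e) []
      = List.replicate k (0 : Int) ++ List.replicate k 1 ++ List.replicate k 0 ++
        List.replicate k (-1) := by
    rw [pv_foldl_append_flatMap (fun e => List.replicate (k : Int).toNat e)]
    simp [List.append_assoc]
  rw [hfold, Int.toNat_natCast, pv_row_eq n k hk hkn, PySem.List.pyRange_zero_natCast,
    List.map_map]
  apply List.map_congr_left
  intro j _
  simp only [Function.comp]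
  rw [show ((j : Int) + 1) = (((j + 1 : Nat) : Int)) by push_cast; ring,
    PySem.Int.floordiv_natCast, show (4 : Int) = ((4 : Nat) : Int) by norm_num,
    PySem.Int.mod_natCast]
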